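-- pv_equiv track=rewrite | github.com/manuelhn20/adminDisp | admin_disp/devices/correlativo_helper.py | get_formats_for_categoria
-- ===== SOURCE A (Python) =====
-- from typing import Optional, Dict, List
--
-- CORRELATIVO_FORMATS = {
--     # Certificado de Compromiso y Entrega de Teléfono Corporativo
--     'PRO-TI-CE-001': ['Celular'],
--
--     # Memorando de Entrega (para Celular)
--     'PRO-TI-CE-002': ['Celular'],
--
--     # Entrega de Tablet / Teléfono
--     'PRO-TI-CE-003': ['Tablet'],
--
--     # Certificado Entrega de Computadora
--     'PRO-TI-CE-004': ['Laptop'],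
--
--     # Entrega de Periférico
--     'PRO-TI-CE-005': ['Teclado', 'Mouse', 'Auriculares', 'Monitor', 'Impresora',
--                        'Teléfono VoIP', 'Router', 'Switch', 'Adaptador']
-- }
--
-- def get_formats_for_categoria(categoria: str) -> List[str]:
--     """
--     Retorna la lista de formatos de correlativo que corresponden a una categoría de dispositivo.
--
--     Args:
--         categoria: Categoría del dispositivo (ej: 'Celular', 'Laptop', etc.)
--
--     Returns:
--         Lista de formatos (ej: ['PRO-TI-CE-001', 'PRO-TI-CE-002'] para Celular)
--
--     Raises:
--         ValueError: Si la categoría no tiene formatos asociados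
--     """
--     categoria_normalized = (categoria or '').strip()
--
--     formatos_encontrados = []
--     for formato, categorias in CORRELATIVO_FORMATS.items():
--         # Comparación case-insensitive
--         if any(cat.lower() == categoria_normalized.lower() for cat in categorias):
--             formatos_encontrados.append(formato)
--
--     if not formatos_encontrados:
--         raise ValueError(f"No se encontró formato de correlativo para la categoría: {categoria}")
--
--     return sorted(formatos_encontrados)
-- ===== SOURCE B (Python) =====
-- CORRELATIVO_FORMATS = {
--     'PRO-TI-CE-001': ['Celular'],
--     'PRO-TI-CE-002': ['Celular'],
--     'PRO-TI-CE-003': ['Tablet'],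
--     'PRO-TI-CE-004': ['Laptop'],
--     'PRO-TI-CE-005': ['Teclado', 'Mouse', 'Auriculares', 'Monitor', 'Impresora',
--                       'Teléfono VoIP', 'Router', 'Switch', 'Adaptador']
-- }
--
-- # Inverse index, built once at module scope: lowercased category -> formats.
-- CATEGORY_TO_FORMATS = {}
-- for _formato, _categorias in CORRELATIVO_FORMATS.items():
--     for _cat in _categorias:
--         CATEGORY_TO_FORMATS.setdefault(_cat.lower(), []).append(_formato)
--
--
-- def get_formats_for_categoria(categoria):
--     key = (categoria or '').strip().lower()
--     formatos = CATEGORY_TO_FORMATS.get(key)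
--     if not formatos:
--         raise ValueError(f"No se encontró formato de correlativo para la categoría: {categoria}")
--     return sorted(formatos)
-- ===== Notes on version B (the rewrite author's own statement) =====
-- stated objective: idiomatic
-- what changed: B precomputes a module-level inverse index (lowercased category -> formats) once, so each call is a single dict lookup instead of A's per-call scan over every format entry with an inner any() over its categories.
import Mathlib
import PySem

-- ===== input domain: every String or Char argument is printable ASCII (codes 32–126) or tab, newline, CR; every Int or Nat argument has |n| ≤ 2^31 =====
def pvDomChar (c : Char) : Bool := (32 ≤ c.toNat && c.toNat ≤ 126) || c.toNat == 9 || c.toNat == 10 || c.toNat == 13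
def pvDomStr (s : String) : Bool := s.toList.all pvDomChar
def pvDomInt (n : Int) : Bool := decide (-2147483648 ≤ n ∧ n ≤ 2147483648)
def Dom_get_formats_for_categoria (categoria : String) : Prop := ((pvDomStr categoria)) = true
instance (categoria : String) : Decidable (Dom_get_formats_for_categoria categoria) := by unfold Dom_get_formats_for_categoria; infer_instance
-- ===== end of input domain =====

-- B replaces A's per-call scan over all format entries by a module-level inverse index
-- (lowercased category -> formats) consulted with a single lookup per call (idiomatic).

-- ===== PORT A =====
def CORRELATIVO_FORMATS : List (String × List String) :=
  [("PRO-TI-CE-001", ["Celular"]),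
   ("PRO-TI-CE-002", ["Celular"]),
   ("PRO-TI-CE-003", ["Tablet"]),
   ("PRO-TI-CE-004", ["Laptop"]),
   ("PRO-TI-CE-005", ["Teclado", "Mouse", "Auriculares", "Monitor", "Impresora",
                      "Teléfono VoIP", "Router", "Switch", "Adaptador"])]

-- Python A raises ValueError when no format matches; Pre_ excludes exactly those inputs
-- and the port returns [] there (sorted of the empty accumulator).
def get_formats_for_categoria (categoria : String) : List String :=
  PySem.List.sorted
    (CORRELATIVO_FORMATS.foldl
      (fun acc p =>
        -- `(categoria or '').strip()` equals `categoria.strip()` on strings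
        if p.2.any (fun cat => PySem.Str.lower cat == PySem.Str.lower (PySem.Str.strip categoria))
        then acc ++ [p.1] else acc)
      [])
    (fun x => x) false

-- ===== PORT B =====
-- module-level inverse index built once: lowercased category -> list of its formats
def CATEGORY_TO_FORMATS : PySem.Dict String (List String) :=
  CORRELATIVO_FORMATS.foldl
    (fun idx p => p.2.foldl
      (fun idx2 cat =>
        idx2.insert (PySem.Str.lower cat) (idx2.getD (PySem.Str.lower cat) [] ++ [p.1]))
      idx)
    PySem.Dict.empty

-- Python B raises ValueError when the key is absent (excluded by Pre_); the port returns [].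
def get_formats_for_categoria_alt (categoria : String) : List String :=
  match CATEGORY_TO_FORMATS.get? (PySem.Str.lower (PySem.Str.strip categoria)) with
  | some formatos => PySem.List.sorted formatos (fun x => x) false
  | none => []

-- ===== PRECONDITION & SPEC =====
-- Pre_ excludes exactly the inputs on which Python A raises ValueError: those whose
-- stripped, lowercased value is not one of the known device categories.
def Pre_get_formats_for_categoria (categoria : String) : Prop :=
  PySem.Str.lower (PySem.Str.strip categoria) ∈
    ["celular", "tablet", "laptop", "teclado", "mouse", "auriculares", "monitor",
     "impresora", "teléfono voip", "router", "switch", "adaptador"]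
instance (categoria : String) : Decidable (Pre_get_formats_for_categoria categoria) := by
  unfold Pre_get_formats_for_categoria; infer_instance

def pvWitness_get_formats_for_categoria : String := "Celular"

def Spec_get_formats_for_categoria (categoria : String) (out : List String) : Prop := out = get_formats_for_categoria_alt categoria
instance (categoria : String) (out : List String) : Decidable (Spec_get_formats_for_categoria categoria out) := by unfold Spec_get_formats_for_categoria; infer_instance

-- ===== CLAIM (what is proved, stated in full; the proofs are below) =====
def Claim_equal_get_formats_for_categoria : Prop := ∀ (categoria : String), Dom_get_formats_for_categoria categoria → Pre_get_formats_for_categoria categoria → Spec_get_formats_for_categoria categoria (get_formats_for_categoria categoria)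

-- ===== LEMMAS AND PROOFS =====

-- the built inverse index, as a literal (both programs insert formats in ascending order,
-- so every stored list is already sorted and A's scan produces the same list)
theorem idx_eq : CATEGORY_TO_FORMATS = PySem.Dict.mk
    [("celular", ["PRO-TI-CE-001", "PRO-TI-CE-002"]),
     ("tablet", ["PRO-TI-CE-003"]),
     ("laptop", ["PRO-TI-CE-004"]),
     ("teclado", ["PRO-TI-CE-005"]),
     ("mouse", ["PRO-TI-CE-005"]),
     ("auriculares", ["PRO-TI-CE-005"]),
     ("monitor", ["PRO-TI-CE-005"]),
     ("impresora", ["PRO-TI-CE-005"]),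
     ("teléfono voip", ["PRO-TI-CE-005"]),
     ("router", ["PRO-TI-CE-005"]),
     ("switch", ["PRO-TI-CE-005"]),
     ("adaptador", ["PRO-TI-CE-005"])] := by rfl

-- lowercase of each category literal (evaluated once, reused in every case)
theorem low_cel : PySem.Str.lower "Celular" = "celular" := by rfl
theorem low_tab : PySem.Str.lower "Tablet" = "tablet" := by rfl
theorem low_lap : PySem.Str.lower "Laptop" = "laptop" := by rfl
theorem low_tec : PySem.Str.lower "Teclado" = "teclado" := by rfl
theorem low_mou : PySem.Str.lower "Mouse" = "mouse" := by rfl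
theorem low_aur : PySem.Str.lower "Auriculares" = "auriculares" := by rfl
theorem low_mon : PySem.Str.lower "Monitor" = "monitor" := by rfl
theorem low_imp : PySem.Str.lower "Impresora" = "impresora" := by rfl
theorem low_tel : PySem.Str.lower "Teléfono VoIP" = "teléfono voip" := by rfl
theorem low_rou : PySem.Str.lower "Router" = "router" := by rfl
theorem low_swi : PySem.Str.lower "Switch" = "switch" := by rfl
theorem low_ada : PySem.Str.lower "Adaptador" = "adaptador" := by rfl

-- ===== VERDICT (by name: the statement is the Claim_ definition above) =====
theorem get_formats_for_categoria_spec : Claim_equal_get_formats_for_categoria := by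
  intro categoria _ hpre
  unfold Pre_get_formats_for_categoria at hpre
  unfold Spec_get_formats_for_categoria
  simp only [List.mem_cons, List.not_mem_nil, or_false] at hpre
  rcases hpre with h|h|h|h|h|h|h|h|h|h|h|h <;>
    simp only [get_formats_for_categoria, get_formats_for_categoria_alt, CORRELATIVO_FORMATS,
      idx_eq, h, low_cel, low_tab, low_lap, low_tec, low_mou, low_aur, low_mon, low_imp,
      low_tel, low_rou, low_swi, low_ada, PySem.Dict.get?_mk_cons, List.any_cons, List.any_nil,
      List.foldl_cons, List.foldl_nil, String.reduceBEq, Bool.or_false, Bool.false_or,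
      List.nil_append] <;> rfl
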